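-- pv_equiv track=rewrite | github.com/BharathPeethala/python-DSA | LeetCode Dialy/FindandReplacePattern(890).py | findAndReplace
-- ===== SOURCE A (Python) =====
-- def compare(pattern, word):
--     map1 = dict()
--     map2 = dict()
--     n = len(word)
--     i = 0
--     while(i < n):
--         if word[i] in map1 and map1[word[i]] != pattern[i] or pattern[i] in map2 and map2[pattern[i]] != word[i]:
--             return False
--         else:
--             map1[word[i]] = pattern[i]
--             map2[pattern[i]] = word[i]
--         i += 1
--     return True
--
-- def findAndReplace(words, pattern):
--     res = list()
--     for word in words:
--         if len(word) != len(pattern):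
--             continue
--         if compare(pattern, word):
--             res.append(word)
--     return res
-- ===== SOURCE B (Python) =====
-- def normalize(s):
--     firsts = {}
--     out = []
--     for c in s:
--         if c not in firsts:
--             firsts[c] = len(firsts)
--         out.append(firsts[c])
--     return out
--
--
-- def findAndReplace(words, pattern):
--     p = normalize(pattern)
--     return [w for w in words if normalize(w) == p]
-- ===== Notes on version B (the rewrite author's own statement) =====
-- stated objective: simpler
-- what changed: Replaces the per-word two-dict bijection check (with explicit length guard) by a canonical-form approach: each string is normalized to its list of first-occurrence indices once, and words are kept exactly when their normal form equals the pattern's.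
import Mathlib
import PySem

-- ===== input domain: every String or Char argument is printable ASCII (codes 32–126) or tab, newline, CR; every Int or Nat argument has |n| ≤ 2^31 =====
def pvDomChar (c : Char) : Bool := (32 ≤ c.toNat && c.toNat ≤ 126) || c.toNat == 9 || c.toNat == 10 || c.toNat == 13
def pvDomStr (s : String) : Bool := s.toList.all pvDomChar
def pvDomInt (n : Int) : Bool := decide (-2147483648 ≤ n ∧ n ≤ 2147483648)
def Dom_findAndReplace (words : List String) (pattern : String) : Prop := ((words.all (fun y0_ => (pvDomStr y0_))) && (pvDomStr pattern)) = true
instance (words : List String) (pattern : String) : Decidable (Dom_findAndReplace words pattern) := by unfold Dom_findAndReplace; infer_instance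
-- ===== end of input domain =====

-- B replaces A's per-word two-dict bijection check by a simpler canonical form:
-- each string is normalized to its list of first-occurrence indices, and a word is
-- kept exactly when its normal form equals the pattern's.

-- ===== PORT A =====
-- the `while i < n` loop of Python's `compare` (two dicts, index i)
def compareLoop (pattern word : List Char) (n i : Nat) (map1 map2 : PySem.Dict Char Char) : Bool :=
  if _h : i < n then
    match PySem.List.pyGet? word (i : Int), PySem.List.pyGet? pattern (i : Int) with
    | some wc, some pc =>
      if ((match map1.get? wc with | some v => !(v == pc) | none => false) ||
          (match map2.get? pc with | some v => !(v == wc) | none => false)) then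
        false
      else
        compareLoop pattern word n (i + 1) (map1.insert wc pc) (map2.insert pc wc)
    | _, _ => false  -- IndexError; never reached: findAndReplace calls cmpPW with equal lengths
  else
    true
  termination_by n - i

def cmpPW (pattern word : String) : Bool :=
  compareLoop pattern.toList word.toList word.toList.length 0 PySem.Dict.empty PySem.Dict.empty

def findAndReplace (words : List String) (pattern : String) : List String :=
  words.foldl (fun res word =>
    if PySem.Str.len word ≠ PySem.Str.len pattern then res
    else if cmpPW pattern word then res ++ [word] else res) []

-- ===== PORT B =====
def normCanon (s : String) : List Int :=
  (s.toList.foldl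
    (fun (st : PySem.Dict Char Int × List Int) c =>
      let firsts := if st.1.contains c then st.1 else st.1.insert c (st.1.size : Int)
      (firsts, st.2 ++ [firsts.getD c 0]))
    (PySem.Dict.empty, [])).2

def findAndReplace_alt (words : List String) (pattern : String) : List String :=
  let p := normCanon pattern
  words.filter (fun w => normCanon w == p)

-- ===== PRECONDITION & SPEC =====
def Spec_findAndReplace (words : List String) (pattern : String) (out : List String) : Prop := out = findAndReplace_alt words pattern
instance (words : List String) (pattern : String) (out : List String) : Decidable (Spec_findAndReplace words pattern out) := by unfold Spec_findAndReplace; infer_instance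

-- ===== CLAIM (what is proved, stated in full; the proofs are below) =====
def Claim_equal_findAndReplace : Prop := ∀ (words : List String) (pattern : String), Dom_findAndReplace words pattern → Spec_findAndReplace words pattern (findAndReplace words pattern)

-- ===== LEMMAS AND PROOFS =====

-- accumulator-free form of `normCanon`'s loop
def normGo (d : PySem.Dict Char Int) : List Char → List Int
  | [] => []
  | c :: cs =>
    let d' := if d.contains c then d else d.insert c (d.size : Int)
    d'.getD c 0 :: normGo d' cs

-- structural (two-list) form of A's `compareLoop`
def compRest (m1 m2 : PySem.Dict Char Char) : List Char → List Char → Bool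
  | wc :: ws, pc :: ps =>
    if ((match m1.get? wc with | some v => !(v == pc) | none => false) ||
        (match m2.get? pc with | some v => !(v == wc) | none => false)) then false
    else compRest (m1.insert wc pc) (m2.insert pc wc) ws ps
  | _, _ => true

-- joint invariant: (m1, m2) is the forward/backward char map and (fw, fp) are the
-- first-occurrence index dicts of the same processed prefixes
def JointInv (m1 m2 : PySem.Dict Char Char) (fw fp : PySem.Dict Char Int) : Prop :=
  fw.size = fp.size ∧
  (∀ a k, fw.get? a = some k → k < (fw.size : Int)) ∧
  (∀ b k, fp.get? b = some k → k < (fp.size : Int)) ∧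
  (∀ a a' k, fw.get? a = some k → fw.get? a' = some k → a = a') ∧
  (∀ b b' k, fp.get? b = some k → fp.get? b' = some k → b = b') ∧
  (∀ a k, fw.get? a = some k → ∃ b, fp.get? b = some k) ∧
  (∀ b k, fp.get? b = some k → ∃ a, fw.get? a = some k) ∧
  (∀ a b, m1.get? a = some b ↔ ∃ k, fw.get? a = some k ∧ fp.get? b = some k) ∧
  (∀ b a, m2.get? b = some a ↔ ∃ k, fw.get? a = some k ∧ fp.get? b = some k)

lemma inv_empty : JointInv PySem.Dict.empty PySem.Dict.empty PySem.Dict.empty PySem.Dict.empty := by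
  refine ⟨rfl, ?_, ?_, ?_, ?_, ?_, ?_, ?_, ?_⟩ <;> simp [PySem.Dict.get?_empty]

lemma length_normGo (d : PySem.Dict Char Int) (cs : List Char) :
    (normGo d cs).length = cs.length := by
  induction cs generalizing d with
  | nil => rfl
  | cons c cs ih => simp [normGo, ih]

lemma normCanon_foldl (cs : List Char) : ∀ (d : PySem.Dict Char Int) (acc : List Int),
    (cs.foldl
      (fun (st : PySem.Dict Char Int × List Int) c =>
        let firsts := if st.1.contains c then st.1 else st.1.insert c (st.1.size : Int)
        (firsts, st.2 ++ [firsts.getD c 0]))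
      (d, acc)).2 = acc ++ normGo d cs := by
  induction cs with
  | nil => simp [normGo]
  | cons c cs ih => intro d acc; simp [normGo, ih]

lemma normCanon_eq (s : String) : normCanon s = normGo PySem.Dict.empty s.toList := by
  unfold normCanon
  rw [normCanon_foldl]
  simp

lemma step_lemma (w p : Char) (m1 m2 : PySem.Dict Char Char) (fw fp : PySem.Dict Char Int)
    (hinv : JointInv m1 m2 fw fp) :
    (((match m1.get? w with | some v => !(v == p) | none => false) ||
      (match m2.get? p with | some v => !(v == w) | none => false)) = false ↔
      (if fw.contains w then fw else fw.insert w (fw.size : Int)).getD w 0 =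
      (if fp.contains p then fp else fp.insert p (fp.size : Int)).getD p 0) ∧
    (((match m1.get? w with | some v => !(v == p) | none => false) ||
      (match m2.get? p with | some v => !(v == w) | none => false)) = false →
      JointInv (m1.insert w p) (m2.insert p w)
        (if fw.contains w then fw else fw.insert w (fw.size : Int))
        (if fp.contains p then fp else fp.insert p (fp.size : Int))) := by
  obtain ⟨hsz, hrw, hrp, hiw, hip, hsw, hsp, h1, h2⟩ := hinv
  have hcw := PySem.Dict.contains_eq_isSome_get? fw w
  have hcp := PySem.Dict.contains_eq_isSome_get? fp p
  cases hfw : fw.get? w with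
  | some kw =>
    -- m1.get? w = some b0 with fp b0 = some kw
    obtain ⟨b0, hb0⟩ := hsw w kw hfw
    have hm1 : m1.get? w = some b0 := (h1 w b0).mpr ⟨kw, hfw, hb0⟩
    have hfw' : (if fw.contains w then fw else fw.insert w (fw.size : Int)) = fw := by
      rw [hcw, hfw]; rfl
    have hgw : fw.getD w 0 = kw := by rw [PySem.Dict.getD_eq_get?_getD, hfw]; rfl
    cases hfp : fp.get? p with
    | some kp =>
      obtain ⟨a0, ha0⟩ := hsp p kp hfp
      have hm2 : m2.get? p = some a0 := (h2 p a0).mpr ⟨kp, ha0, hfp⟩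
      have hfp' : (if fp.contains p then fp else fp.insert p (fp.size : Int)) = fp := by
        rw [hcp, hfp]; rfl
      have hgp : fp.getD p 0 = kp := by rw [PySem.Dict.getD_eq_get?_getD, hfp]; rfl
      rw [hfw', hfp', hm1, hm2, hgw, hgp]
      constructor
      · constructor
        · intro hF
          simp only [Bool.or_eq_false_iff, Bool.not_eq_false', beq_iff_eq] at hF
          obtain ⟨hbp, haw⟩ := hF
          rw [hbp, hfp] at hb0
          exact (Option.some_inj.mp hb0).symm
        · intro hk
          subst hk
          have hbp : b0 = p := hip b0 p kw hb0 hfp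
          have haw : a0 = w := hiw a0 w kw ha0 hfw
          simp [hbp, haw]
      · intro hF
        simp only [Bool.or_eq_false_iff, Bool.not_eq_false', beq_iff_eq] at hF
        obtain ⟨hbp, haw⟩ := hF
        have hkk : kw = kp := by
          rw [hbp, hfp] at hb0; exact (Option.some_inj.mp hb0).symm
        subst hkk
        refine ⟨hsz, hrw, hrp, hiw, hip, hsw, hsp, ?_, ?_⟩
        · intro a b
          rw [PySem.Dict.get?_insert]
          by_cases haw : a = w
          · subst haw
            rw [if_pos rfl]
            constructor
            · rintro h; cases h; exact ⟨kw, hfw, hfp⟩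
            · rintro ⟨k, hk1, hk2⟩
              rw [hfw] at hk1; cases hk1
              have := hip b p kw hk2 hfp; simp [this]
          · rw [if_neg haw]; exact h1 a b
        · intro b a
          rw [PySem.Dict.get?_insert]
          by_cases hbp : b = p
          · subst hbp
            rw [if_pos rfl]
            constructor
            · rintro h; cases h; exact ⟨kw, hfw, hfp⟩
            · rintro ⟨k, hk1, hk2⟩
              rw [hfp] at hk2; cases hk2
              have := hiw a w kw hk1 hfw; simp [this]
          · rw [if_neg hbp]; exact h2 b a
    | none =>
      -- m2.get? p = none
      have hm2 : m2.get? p = none := by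
        cases h : m2.get? p with
        | none => rfl
        | some a0 => obtain ⟨k, _, hk2⟩ := (h2 p a0).mp h; rw [hfp] at hk2; cases hk2
      have hfp' : (if fp.contains p then fp else fp.insert p (fp.size : Int)) = fp.insert p (fp.size : Int) := by
        rw [hcp, hfp]; rfl
      rw [hfw', hfp', hm1, hm2, hgw]
      have hgp : (fp.insert p (fp.size : Int)).getD p 0 = (fp.size : Int) :=
        PySem.Dict.getD_insert_self _ _ _ _
      rw [hgp]
      have hbne : b0 ≠ p := by
        intro h; rw [h, hfp] at hb0; cases hb0
      have hklt : kw < (fw.size : Int) := hrw w kw hfw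
      constructor
      · constructor
        · intro hF; simp [hbne] at hF
        · intro hk; omega
      · intro hF; simp [hbne] at hF
  | none =>
    have hm1 : m1.get? w = none := by
      cases h : m1.get? w with
      | none => rfl
      | some b0 => obtain ⟨k, hk1, _⟩ := (h1 w b0).mp h; rw [hfw] at hk1; cases hk1
    have hfw' : (if fw.contains w then fw else fw.insert w (fw.size : Int)) = fw.insert w (fw.size : Int) := by
      rw [hcw, hfw]; rfl
    have hgw : (fw.insert w (fw.size : Int)).getD w 0 = (fw.size : Int) :=
      PySem.Dict.getD_insert_self _ _ _ _
    cases hfp : fp.get? p with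
    | some kp =>
      obtain ⟨a0, ha0⟩ := hsp p kp hfp
      have hm2 : m2.get? p = some a0 := (h2 p a0).mpr ⟨kp, ha0, hfp⟩
      have hfp' : (if fp.contains p then fp else fp.insert p (fp.size : Int)) = fp := by
        rw [hcp, hfp]; rfl
      have hgp : fp.getD p 0 = kp := by rw [PySem.Dict.getD_eq_get?_getD, hfp]; rfl
      rw [hfw', hfp', hm1, hm2, hgw, hgp]
      have hane : a0 ≠ w := by
        intro h; rw [h, hfw] at ha0; cases ha0
      have hklt : kp < (fp.size : Int) := hrp p kp hfp
      constructor
      · constructor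
        · intro hF; simp [hane] at hF
        · intro hk; omega
      · intro hF; simp [hane] at hF
    | none =>
      have hm2 : m2.get? p = none := by
        cases h : m2.get? p with
        | none => rfl
        | some a0 => obtain ⟨k, _, hk2⟩ := (h2 p a0).mp h; rw [hfp] at hk2; cases hk2
      have hfw' : (if fw.contains w then fw else fw.insert w (fw.size : Int)) = fw.insert w (fw.size : Int) := by
        rw [hcw, hfw]; rfl
      have hfp' : (if fp.contains p then fp else fp.insert p (fp.size : Int)) = fp.insert p (fp.size : Int) := by
        rw [hcp, hfp]; rfl
      have hncw : fw.contains w = false := by rw [hcw, hfw]; rfl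
      have hncp : fp.contains p = false := by rw [hcp, hfp]; rfl
      rw [hfw', hfp', hm1, hm2, hgw, PySem.Dict.getD_insert_self]
      have hszw : (fw.insert w (fw.size : Int)).size = fw.size + 1 := by
        rw [PySem.Dict.size_insert, hncw]; simp
      have hszp : (fp.insert p (fp.size : Int)).size = fp.size + 1 := by
        rw [PySem.Dict.size_insert, hncp]; simp
      constructor
      · simp [hsz]
      · intro _
        refine ⟨by rw [hszw, hszp, hsz], ?_, ?_, ?_, ?_, ?_, ?_, ?_, ?_⟩
        · intro a k hk
          rw [PySem.Dict.get?_insert] at hk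
          rw [hszw]; push_cast
          split_ifs at hk with h
          · cases hk; omega
          · have := hrw a k hk; omega
        · intro b k hk
          rw [PySem.Dict.get?_insert] at hk
          rw [hszp]; push_cast
          split_ifs at hk with h
          · cases hk; omega
          · have := hrp b k hk; omega
        · intro a a' k hk hk'
          rw [PySem.Dict.get?_insert] at hk hk'
          split_ifs at hk hk' with h h' h'
          · rw [h, h']
          · cases hk; have := hrw a' _ hk'; omega
          · cases hk'; have := hrw a _ hk; omega
          · exact hiw a a' k hk hk'
        · intro b b' k hk hk'
          rw [PySem.Dict.get?_insert] at hk hk'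
          split_ifs at hk hk' with h h' h'
          · rw [h, h']
          · cases hk; have := hrp b' _ hk'; omega
          · cases hk'; have := hrp b _ hk; omega
          · exact hip b b' k hk hk'
        · intro a k hk
          rw [PySem.Dict.get?_insert] at hk
          split_ifs at hk with h
          · cases hk
            exact ⟨p, by rw [PySem.Dict.get?_insert, if_pos rfl, ← hsz]⟩
          · obtain ⟨b, hb⟩ := hsw a k hk
            refine ⟨b, ?_⟩
            rw [PySem.Dict.get?_insert]
            split_ifs with hbp
            · rw [hbp, hfp] at hb; cases hb
            · exact hb
        · intro b k hk
          rw [PySem.Dict.get?_insert] at hk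
          split_ifs at hk with h
          · cases hk
            exact ⟨w, by rw [PySem.Dict.get?_insert, if_pos rfl, hsz]⟩
          · obtain ⟨a, ha⟩ := hsp b k hk
            refine ⟨a, ?_⟩
            rw [PySem.Dict.get?_insert]
            split_ifs with haw
            · rw [haw, hfw] at ha; cases ha
            · exact ha
        · intro a b
          by_cases haw : a = w
          · rw [haw, PySem.Dict.get?_insert_self, PySem.Dict.get?_insert_self]
            constructor
            · rintro h; cases h
              refine ⟨(fw.size : Int), rfl, ?_⟩
              rw [PySem.Dict.get?_insert_self, ← hsz]
            · rintro ⟨k, hk1, hk2⟩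
              cases hk1
              by_cases hbp : b = p
              · rw [hbp]
              · rw [PySem.Dict.get?_insert_of_ne fp _ hbp] at hk2
                have := hrp b _ hk2; omega
          · rw [PySem.Dict.get?_insert_of_ne m1 _ haw,
                PySem.Dict.get?_insert_of_ne fw _ haw]
            by_cases hbp : b = p
            · rw [hbp, PySem.Dict.get?_insert_self]
              constructor
              · intro h
                obtain ⟨k, _, hk2⟩ := (h1 a p).mp h
                rw [hfp] at hk2; cases hk2
              · rintro ⟨k, hk1, hk2⟩
                cases hk2
                have := hrw a _ hk1; omega
            · rw [PySem.Dict.get?_insert_of_ne fp _ hbp]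
              exact h1 a b
        · intro b a
          by_cases hbp : b = p
          · rw [hbp, PySem.Dict.get?_insert_self]
            constructor
            · rintro h; cases h
              refine ⟨(fw.size : Int), ?_, ?_⟩
              · rw [PySem.Dict.get?_insert_self]
              · rw [PySem.Dict.get?_insert_self, ← hsz]
            · rintro ⟨k, hk1, hk2⟩
              rw [PySem.Dict.get?_insert_self, ← hsz] at hk2
              cases hk2
              by_cases haw : a = w
              · rw [haw]
              · rw [PySem.Dict.get?_insert_of_ne fw _ haw] at hk1
                have := hrw a _ hk1; omega
          · rw [PySem.Dict.get?_insert_of_ne m2 _ hbp,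
                PySem.Dict.get?_insert_of_ne fp _ hbp]
            by_cases haw : a = w
            · rw [haw, PySem.Dict.get?_insert_self]
              constructor
              · intro h
                obtain ⟨k, hk1, _⟩ := (h2 b w).mp h
                rw [hfw] at hk1; cases hk1
              · rintro ⟨k, hk1, hk2⟩
                cases hk1
                have := hrp b _ hk2; omega
            · rw [PySem.Dict.get?_insert_of_ne fw _ haw]
              exact h2 b a

lemma main_iff : ∀ (ws ps : List Char) (m1 m2 : PySem.Dict Char Char) (fw fp : PySem.Dict Char Int),
    ws.length = ps.length → JointInv m1 m2 fw fp →
    (compRest m1 m2 ws ps = true ↔ normGo fw ws = normGo fp ps) := by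
  intro ws
  induction ws with
  | nil =>
    intro ps m1 m2 fw fp hlen _
    cases ps with
    | nil => simp [compRest, normGo]
    | cons p ps => simp at hlen
  | cons w ws ih =>
    intro ps m1 m2 fw fp hlen hinv
    cases ps with
    | nil => simp at hlen
    | cons p ps =>
      obtain ⟨hA, hB⟩ := step_lemma w p m1 m2 fw fp hinv
      rw [compRest, normGo, normGo]
      cases hF : (((match m1.get? w with | some v => !(v == p) | none => false) ||
          (match m2.get? p with | some v => !(v == w) | none => false))) with
      | true =>
        rw [if_pos rfl]
        have hne : (if fw.contains w then fw else fw.insert w (fw.size : Int)).getD w 0 ≠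
            (if fp.contains p then fp else fp.insert p (fp.size : Int)).getD p 0 := by
          intro h
          rw [hA.mpr h] at hF
          cases hF
        simp only [Bool.false_eq_true, false_iff]
        intro h
        exact hne (List.head_eq_of_cons_eq h)
      | false =>
        rw [if_neg (by simp)]
        have hhd := hA.mp hF
        have hinv' := hB hF
        have hlen' : ws.length = ps.length := by simpa using hlen
        rw [ih ps _ _ _ _ hlen' hinv']
        constructor
        · intro h; rw [hhd, h]
        · intro h
          exact List.tail_eq_of_cons_eq h

lemma compareLoop_eq_compRest (wl pl : List Char) (hlen : wl.length = pl.length) :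
    ∀ i m1 m2, i ≤ wl.length →
      compareLoop pl wl wl.length i m1 m2 = compRest m1 m2 (wl.drop i) (pl.drop i) := by
  suffices H : ∀ fuel i m1 m2, wl.length - i = fuel → i ≤ wl.length →
      compareLoop pl wl wl.length i m1 m2 = compRest m1 m2 (wl.drop i) (pl.drop i) by
    intro i m1 m2 hi; exact H _ i m1 m2 rfl hi
  intro fuel
  induction fuel with
  | zero =>
    intro i m1 m2 hf hi
    have hie : i = wl.length := by omega
    subst hie
    rw [compareLoop]
    simp [List.drop_of_length_le, compRest]
  | succ n ih =>
    intro i m1 m2 hf hi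
    have hi' : i < wl.length := by omega
    have hip : i < pl.length := by omega
    have hw : PySem.List.pyGet? wl (i : Int) = some wl[i] := by simp [pysem, hi']
    have hp : PySem.List.pyGet? pl (i : Int) = some pl[i] := by simp [pysem, hip]
    rw [compareLoop, dif_pos hi', hw, hp,
        List.drop_eq_getElem_cons hi', List.drop_eq_getElem_cons hip]
    rw [compRest]
    dsimp only
    split_ifs with _hc
    · rfl
    · exact ih (i + 1) _ _ (by omega) (by omega)

lemma keyLemma (pattern w : String) :
    (if PySem.Str.len w ≠ PySem.Str.len pattern then false
     else cmpPW pattern w) = (normCanon w == normCanon pattern) := by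
  rw [normCanon_eq, normCanon_eq]
  by_cases hl : w.toList.length = pattern.toList.length
  · rw [if_neg (by simp [pysem, hl])]
    have h0 := compareLoop_eq_compRest w.toList pattern.toList hl 0 PySem.Dict.empty
      PySem.Dict.empty (by omega)
    simp only [List.drop_zero] at h0
    unfold cmpPW
    rw [h0]
    have hiff := main_iff w.toList pattern.toList _ _ _ _ hl inv_empty
    cases hc : compRest PySem.Dict.empty PySem.Dict.empty w.toList pattern.toList with
    | true => exact (beq_iff_eq.mpr (hiff.mp hc)).symm
    | false =>
      rw [hc] at hiff
      simp only [Bool.false_eq_true, false_iff] at hiff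
      exact (beq_eq_false_iff_ne.mpr hiff).symm
  · rw [if_pos (by simp [pysem]; exact_mod_cast hl)]
    have hne : normGo PySem.Dict.empty w.toList ≠ normGo PySem.Dict.empty pattern.toList := by
      intro h
      exact hl (by rw [← length_normGo PySem.Dict.empty w.toList, h, length_normGo])
    exact (beq_eq_false_iff_ne.mpr hne).symm

-- ===== VERDICT (by name: the statement is the Claim_ definition above) =====
theorem findAndReplace_spec : Claim_equal_findAndReplace := by
  intro words pattern _
  unfold Spec_findAndReplace findAndReplace findAndReplace_alt
  rw [PySem.List.foldl_congr_mem' words _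
      (fun res w => if (normCanon w == normCanon pattern) then res ++ [w] else res) []
      (by
        intro w _ acc
        have h := keyLemma pattern w
        by_cases hl : PySem.Str.len w ≠ PySem.Str.len pattern
        · rw [if_pos hl] at h
          simp only [if_pos hl, ← h, Bool.false_eq_true, if_false]
        · rw [if_neg hl] at h
          simp only [if_neg hl, ← h])]
  rw [PySem.List.foldl_append_if_eq_filter (fun w => normCanon w == normCanon pattern) words []]
  simp
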